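-- pv_equiv track=rewrite | github.com/wxiaojie/Question-answer-Generation-from-Chest-X-ray-Reports | utils.py | changeinvolve
-- ===== SOURCE A (Python) =====
-- def changeinvolve(temp_p, temp_s):
--     if temp_p.count('involving') > 0:
--         temp_i = [i for i, v in enumerate(temp_p) if v == 'involving']
--         for i in temp_i:
--             in_index = i
--             inc_index = temp_p[in_index:].index('.') + in_index
--             if temp_p[in_index:].count('y') > 0:
--                 iny_index = temp_p[in_index:].index('y') + in_index
--             else:
--                 iny_index = len(temp_p)
--             if inc_index < iny_index:
--                 end_index = inc_index
--             else:
--                 end_index = iny_index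
--             if temp_p[in_index:end_index].count('l') > 0 and temp_p[in_index:end_index].count('d') == 0:
--                 temp_p[in_index] = 'in'
--                 temp_s[in_index] = 'in'
--             elif temp_p[in_index:end_index].count('d') > 0:
--                 temp_p[in_index] = '.'
--                 temp_s[in_index] = '.'
--             else:
--                 temp_p[in_index] = ''
--                 temp_s[in_index] = ''
--     return temp_p, temp_s
-- ===== SOURCE B (Python) =====
-- def changeinvolve(temp_p, temp_s):
--     # Single right-to-left pass; mutates temp_p/temp_s in place like the original.
--     cl = cd = 0
--     i = len(temp_p)
--     for v in reversed(temp_p):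
--         i -= 1
--         if v == '.' or v == 'y':
--             cl = cd = 0
--         elif v == 'l':
--             cl += 1
--         elif v == 'd':
--             cd += 1
--         elif v == 'involving':
--             r = '.' if cd else ('in' if cl else '')
--             temp_p[i] = r
--             temp_s[i] = r
--     return temp_p, temp_s
-- ===== Notes on version B (the rewrite author's own statement) =====
-- stated objective: alternative
-- what changed: Replaces the per-'involving' forward rescans (slice, .index, .count from each occurrence) by one right-to-left pass that maintains the 'l'/'d' counts since the nearest '.'/'y' to the right, so each token is inspected once.
import Mathlib
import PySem

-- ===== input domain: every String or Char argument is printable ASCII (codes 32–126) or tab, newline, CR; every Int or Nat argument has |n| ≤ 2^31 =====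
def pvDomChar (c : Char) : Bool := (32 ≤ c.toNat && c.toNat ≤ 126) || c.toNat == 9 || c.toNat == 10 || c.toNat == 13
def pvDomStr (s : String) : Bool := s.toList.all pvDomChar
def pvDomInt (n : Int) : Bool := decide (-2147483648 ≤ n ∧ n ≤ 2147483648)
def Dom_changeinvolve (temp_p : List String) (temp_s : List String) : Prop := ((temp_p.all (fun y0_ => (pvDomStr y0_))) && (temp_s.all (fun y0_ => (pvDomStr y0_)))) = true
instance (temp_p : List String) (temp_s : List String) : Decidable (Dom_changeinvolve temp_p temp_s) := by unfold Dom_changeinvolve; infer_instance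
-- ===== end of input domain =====

-- B replaces A's per-'involving' forward rescans by one right-to-left pass keeping the
-- 'l'/'d' counts since the nearest '.'/'y' to the right.  Both A and B mutate
-- temp_p/temp_s in place in Python identically; the equivalence proved is about the return value.

-- ===== PORT A =====
-- loop body of A's 'for i in temp_i' loop (st = current (temp_p, temp_s))
def changeinvolveStep (st : List String × List String) (i : Int) : List String × List String :=
  let tp := st.1
  let ts := st.2
  let in_index := i
  -- temp_p[in_index:].index('.') raises ValueError when no '.' occurs there: excluded by Pre_; getD 0 is unreachable inside Pre_
  let inc_index : Int := (((PySem.List.index? (PySem.List.slice tp (some in_index) none) ".").getD 0 : Nat) : Int) + in_index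
  let iny_index : Int :=
    if (PySem.List.slice tp (some in_index) none).count "y" > 0 then
      (((PySem.List.index? (PySem.List.slice tp (some in_index) none) "y").getD 0 : Nat) : Int) + in_index
    else (tp.length : Int)
  let end_index : Int := if inc_index < iny_index then inc_index else iny_index
  let seg := PySem.List.slice tp (some in_index) (some end_index)
  -- temp_s[in_index] = … raises IndexError when in_index ≥ len(temp_s): excluded by Pre_; pySetD is exact in range
  if seg.count "l" > 0 ∧ seg.count "d" = 0 then
    (PySem.List.pySetD tp in_index "in", PySem.List.pySetD ts in_index "in")
  else if seg.count "d" > 0 then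
    (PySem.List.pySetD tp in_index ".", PySem.List.pySetD ts in_index ".")
  else
    (PySem.List.pySetD tp in_index "", PySem.List.pySetD ts in_index "")

def changeinvolve (temp_p : List String) (temp_s : List String) : List String × List String :=
  if temp_p.count "involving" > 0 then
    let temp_i : List Int :=
      (PySem.List.enumerate temp_p 0).filterMap (fun iv => if iv.2 = "involving" then some iv.1 else none)
    temp_i.foldl changeinvolveStep (temp_p, temp_s)
  else (temp_p, temp_s)

-- ===== PORT B =====
-- loop body of B's 'for v in reversed(temp_p)' loop; state = (cl, cd, i, temp_p, temp_s).
-- B only mutates temp_p at the index it is currently visiting, after reading it, so the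
-- reversed(...) iterator only ever yields the ORIGINAL elements: folding over the original
-- list reversed is exact.
def changeinvolveAltStep (st : Int × Int × Int × List String × List String) (v : String) :
    Int × Int × Int × List String × List String :=
  let cl := st.1
  let cd := st.2.1
  let i := st.2.2.1 - 1
  let tp := st.2.2.2.1
  let ts := st.2.2.2.2
  if v = "." ∨ v = "y" then (0, 0, i, tp, ts)
  else if v = "l" then (cl + 1, cd, i, tp, ts)
  else if v = "d" then (cl, cd + 1, i, tp, ts)
  else if v = "involving" then
    let r : String := if cd ≠ 0 then "." else if cl ≠ 0 then "in" else ""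
    -- temp_s[i] = r raises IndexError when i ≥ len(temp_s): excluded by Pre_; pySetD is exact in range
    (cl, cd, i, PySem.List.pySetD tp i r, PySem.List.pySetD ts i r)
  else (cl, cd, i, tp, ts)

def changeinvolve_alt (temp_p : List String) (temp_s : List String) : List String × List String :=
  let st := temp_p.reverse.foldl changeinvolveAltStep (0, 0, (temp_p.length : Int), temp_p, temp_s)
  (st.2.2.2.1, st.2.2.2.2)

-- ===== PRECONDITION & SPEC =====
-- Pre_ excludes exactly the inputs where A raises: an 'involving' with no '.' at-or-after it
-- (ValueError from .index), or an 'involving' at an index ≥ len(temp_s) (IndexError on temp_s[i] = …).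
def Pre_changeinvolve (temp_p : List String) (temp_s : List String) : Prop :=
  ∀ (k : Nat) (h : k < temp_p.length), temp_p[k] = "involving" →
    ("." ∈ temp_p.drop k ∧ k < temp_s.length)
instance (temp_p : List String) (temp_s : List String) : Decidable (Pre_changeinvolve temp_p temp_s) := by
  unfold Pre_changeinvolve; infer_instance

def pvWitness_changeinvolve : List String × List String :=
  (["involving", "lung", "l", ".", "involving", "d", "y", "."],
   ["involving", "lung", "l", ".", "involving", "d", "y", "."])

def Spec_changeinvolve (temp_p : List String) (temp_s : List String) (out : List String × List String) : Prop := out = changeinvolve_alt temp_p temp_s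
instance (temp_p : List String) (temp_s : List String) (out : List String × List String) : Decidable (Spec_changeinvolve temp_p temp_s out) := by unfold Spec_changeinvolve; infer_instance

-- ===== CLAIM (what is proved, stated in full; the proofs are below) =====
def Claim_equal_changeinvolve : Prop := ∀ (temp_p : List String) (temp_s : List String), Dom_changeinvolve temp_p temp_s → Pre_changeinvolve temp_p temp_s → Spec_changeinvolve temp_p temp_s (changeinvolve temp_p temp_s)

-- ===== LEMMAS AND PROOFS =====

-- keep token iff it is neither '.' nor 'y'
def pvPred (v : String) : Bool := !(v == "." || v == "y")

-- value an 'involving' at index k is rewritten to (computed from the ORIGINAL list)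
def pvRval (p : List String) (k : Nat) : String :=
  let reg := (p.drop (k + 1)).takeWhile pvPred
  if reg.count "d" > 0 then "." else if reg.count "l" > 0 then "in" else ""

-- right-to-left summary: per-index replacement annotation, plus the 'l'/'d' counts
-- in the maximal pvPred-prefix of the list
def pvRmap : List String → List (Option String) × Int × Int
  | [] => ([], 0, 0)
  | v :: t =>
    let st := pvRmap t
    let anns := st.1
    let cl := st.2.1
    let cd := st.2.2
    if v = "." ∨ v = "y" then (none :: anns, 0, 0)
    else if v = "l" then (none :: anns, cl + 1, cd)
    else if v = "d" then (none :: anns, cl, cd + 1)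
    else if v = "involving" then
      (some (if cd ≠ 0 then "." else if cl ≠ 0 then "in" else "") :: anns, cl, cd)
    else (none :: anns, cl, cd)

def pvApply (p : List String) (anns : List (Option String)) : List String :=
  List.zipWith (fun v a => a.getD v) p anns

def pvApplyS (s : List String) (anns : List (Option String)) (k : Nat) : List String :=
  match anns with
  | [] => s
  | none :: rest => pvApplyS s rest (k + 1)
  | some r :: rest => pvApplyS (s.set k r) rest (k + 1)

-- ---- pvRmap basics ----

theorem pvRmap_anns_length (p : List String) : (pvRmap p).1.length = p.length := by
  induction p with
  | nil => rfl
  | cons v t ih => simp only [pvRmap]; split_ifs <;> simp [ih]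

theorem pvRmap_cl (p : List String) :
    (pvRmap p).2.1 = (((p.takeWhile pvPred).count "l" : Nat) : Int) := by
  induction p with
  | nil => rfl
  | cons v t ih =>
    simp only [pvRmap]
    by_cases h1 : (v = "." ∨ v = "y")
    · rw [if_pos h1]
      have : pvPred v = false := by rcases h1 with h | h <;> simp [pvPred, h]
      simp [List.takeWhile_cons, this]
    · have hp : pvPred v = true := by
        rcases not_or.mp h1 with ⟨ha, hb⟩; simp [pvPred, ha, hb]
      rw [if_neg h1]
      by_cases h2 : v = "l"
      · rw [if_pos h2]; subst h2; simp [List.takeWhile_cons, hp, List.count_cons, ih]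
      · rw [if_neg h2]
        by_cases h3 : v = "d"
        · rw [if_pos h3]; subst h3; simp [List.takeWhile_cons, hp, List.count_cons, ih]
        · rw [if_neg h3]
          by_cases h4 : v = "involving"
          · rw [if_pos h4]; subst h4; simp [List.takeWhile_cons, hp, List.count_cons, ih]
          · rw [if_neg h4]; simp [List.takeWhile_cons, hp, List.count_cons, h2, ih]

theorem pvRmap_cd (p : List String) :
    (pvRmap p).2.2 = (((p.takeWhile pvPred).count "d" : Nat) : Int) := by
  induction p with
  | nil => rfl
  | cons v t ih =>
    simp only [pvRmap]
    by_cases h1 : (v = "." ∨ v = "y")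
    · rw [if_pos h1]
      have : pvPred v = false := by rcases h1 with h | h <;> simp [pvPred, h]
      simp [List.takeWhile_cons, this]
    · have hp : pvPred v = true := by
        rcases not_or.mp h1 with ⟨ha, hb⟩; simp [pvPred, ha, hb]
      rw [if_neg h1]
      by_cases h2 : v = "l"
      · rw [if_pos h2]; subst h2; simp [List.takeWhile_cons, hp, List.count_cons, ih]
      · rw [if_neg h2]
        by_cases h3 : v = "d"
        · rw [if_pos h3]; subst h3; simp [List.takeWhile_cons, hp, List.count_cons, ih]
        · rw [if_neg h3]
          by_cases h4 : v = "involving"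
          · rw [if_pos h4]; subst h4; simp [List.takeWhile_cons, hp, List.count_cons, ih]
          · rw [if_neg h4]; simp [List.takeWhile_cons, hp, List.count_cons, h3, ih]

theorem pvRmap_anns_cons (v : String) (t : List String) :
    (pvRmap (v :: t)).1 =
      (if v = "involving" then some (pvRval (v :: t) 0) else none) :: (pvRmap t).1 := by
  simp only [pvRmap]
  by_cases h1 : (v = "." ∨ v = "y")
  · rw [if_pos h1]
    have hv : v ≠ "involving" := by rcases h1 with h | h <;> simp [h]
    simp [hv]
  · rw [if_neg h1]
    by_cases h2 : v = "l"
    · rw [if_pos h2]; simp [h2]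
    · rw [if_neg h2]
      by_cases h3 : v = "d"
      · rw [if_pos h3]; simp [h3]
      · rw [if_neg h3]
        by_cases h4 : v = "involving"
        · rw [if_pos h4]; subst h4
          have hval : pvRval ("involving" :: t) 0 =
              (if (pvRmap t).2.2 ≠ 0 then "." else if (pvRmap t).2.1 ≠ 0 then "in" else "") := by
            rw [pvRmap_cl, pvRmap_cd]
            simp only [pvRval, List.drop_succ_cons, List.drop_zero]
            split_ifs <;> first | rfl | omega
          simp [hval]
        · rw [if_neg h4]; simp [h4]

theorem pvRmap_anns_getElem (p : List String) (j : Nat) (hj : j < p.length) :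
    (pvRmap p).1[j]'(by rw [pvRmap_anns_length]; exact hj) =
      if p[j] = "involving" then some (pvRval p j) else none := by
  induction p generalizing j with
  | nil => simp at hj
  | cons v t ih =>
    cases j with
    | zero => simp [pvRmap_anns_cons]
    | succ m =>
      have hm : m < t.length := by simpa using hj
      have := ih m hm
      simp only [pvRmap_anns_cons]
      simpa [pvRval, List.drop_succ_cons] using this

-- ---- take / takeWhile ----

theorem take_eq_takeWhile_of {α : Type} (pred : α → Bool) :
    ∀ (t : List α) (m : Nat) (hm : m ≤ t.length),
      (∀ (j : Nat) (hj : j < m), pred (t[j]'(by omega)) = true) →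
      (∀ h : m < t.length, pred (t[m]'h) = false) →
      t.take m = t.takeWhile pred := by
  intro t
  induction t with
  | nil => intro m _ _ _; simp
  | cons v t ih =>
    intro m hm h1 h2
    cases m with
    | zero =>
      have := h2 (by simp)
      simp at this
      simp [List.takeWhile_cons, this]
    | succ m =>
      have hv : pred v = true := h1 0 (by omega)
      have := ih m (by simpa using hm) (fun j hj => h1 (j+1) (by omega))
        (fun h => by simpa using h2 (by simpa using h))
      simp [List.takeWhile_cons, hv, List.take_succ_cons, this]

-- ---- pvApply / pvApplyS ----

theorem pvApply_length (p : List String) (anns : List (Option String))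
    (h : anns.length = p.length) : (pvApply p anns).length = p.length := by
  simp [pvApply, h]

theorem pvApply_getElem (p : List String) (anns : List (Option String))
    (h : anns.length = p.length) (j : Nat) (hj : j < p.length) :
    (pvApply p anns)[j]'(by rw [pvApply_length p anns h]; exact hj) =
      (anns[j]'(by omega)).getD (p[j]'hj) := by
  simp [pvApply]

theorem pvApplyS_length : ∀ (anns : List (Option String)) (s : List String) (k : Nat),
    (pvApplyS s anns k).length = s.length := by
  intro anns
  induction anns with
  | nil => intro s k; rfl
  | cons a rest ih =>
    intro s k
    cases a with
    | none => simpa [pvApplyS] using ih s (k + 1)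
    | some r => simpa [pvApplyS] using ih (s.set k r) (k + 1)

theorem pvApplyS_getElem : ∀ (anns : List (Option String)) (s : List String) (k j : Nat)
    (hj : j < s.length),
    (pvApplyS s anns k)[j]'(by rw [pvApplyS_length]; exact hj) =
      if h : k ≤ j ∧ j - k < anns.length then (anns[j - k]'h.2).getD (s[j]'hj) else s[j]'hj := by
  intro anns
  induction anns with
  | nil => intro s k j hj; simp [pvApplyS]
  | cons a rest ih =>
    intro s k j hj
    by_cases hkj : j = k
    · subst hkj
      cases a with
      | none =>
        have := ih s (j + 1) j hj
        rw [dif_neg (by omega)] at this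
        simp only [pvApplyS]
        rw [this, dif_pos (⟨le_refl _, by simp⟩ : j ≤ j ∧ j - j < (none :: rest).length)]
        simp
      | some r =>
        have := ih (s.set j r) (j + 1) j (by simpa using hj)
        rw [dif_neg (by omega)] at this
        simp only [pvApplyS]
        rw [this, dif_pos (⟨le_refl _, by simp⟩ : j ≤ j ∧ j - j < (some r :: rest).length)]
        simp [List.getElem_set]
    · have hs' : ∀ (s' : List String) (hj' : j < s'.length) (hv : s'[j]'hj' = s[j]'hj),
          (pvApplyS s' rest (k + 1))[j]'(by rw [pvApplyS_length]; exact hj') =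
            if h : k ≤ j ∧ j - k < (a :: rest).length then
              ((a :: rest)[j - k]'h.2).getD (s[j]'hj) else s[j]'hj := by
        intro s' hj' hv
        rw [ih s' (k + 1) j hj']
        rcases Nat.lt_or_ge j (k + 1) with hlt | hge
        · rw [dif_neg (by rintro ⟨h, _⟩; omega), dif_neg (by rintro ⟨h, _⟩; omega)]
          exact hv
        · by_cases h2 : j - (k + 1) < rest.length
          · rw [dif_pos ⟨by omega, h2⟩,
              dif_pos (⟨by omega, by simp only [List.length_cons]; omega⟩ :
                k ≤ j ∧ j - k < (a :: rest).length)]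
            have hidx : j - k = (j - (k + 1)) + 1 := by omega
            simp only [hidx, List.getElem_cons_succ, hv]
          · rw [dif_neg (by rintro ⟨_, h⟩; exact h2 h),
              dif_neg (by rintro ⟨_, hb⟩; simp only [List.length_cons] at hb; omega)]
            exact hv
      cases a with
      | none => simpa [pvApplyS] using hs' s hj rfl
      | some r =>
        have hlen : j < (s.set k r).length := by simpa using hj
        simpa [pvApplyS] using hs' (s.set k r) hlen (by rw [List.getElem_set]; simp [Ne.symm hkj])

theorem pvApplyS_set_comm : ∀ (anns : List (Option String)) (s : List String) (k j : Nat)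
    (v : String), j < k →
    pvApplyS (s.set j v) anns k = (pvApplyS s anns k).set j v := by
  intro anns
  induction anns with
  | nil => intro s k j v _; rfl
  | cons a rest ih =>
    intro s k j v hjk
    cases a with
    | none => simpa [pvApplyS] using ih s (k + 1) j v (by omega)
    | some r =>
      simp only [pvApplyS]
      rw [List.set_comm v r (show j ≠ k by omega)]
      exact ih (s.set k r) (k + 1) j v (by omega)

-- ---- foldl over the index list with plain writes ----

theorem pv_drop_set_of_lt {α : Type} (l : List α) (i j : Nat) (v : α) (h : i < j) :
    (l.set i v).drop j = l.drop j := by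
  apply List.ext_getElem?
  intro m
  rw [List.getElem?_drop, List.getElem?_drop, List.getElem?_set_ne (by omega)]

theorem pv_length_foldl_set (f : Nat → String) :
    ∀ (idxs : List Int) (q : List String),
      (idxs.foldl (fun q i => q.set i.toNat (f i.toNat)) q).length = q.length := by
  intro idxs
  induction idxs with
  | nil => intro q; rfl
  | cons i rest ih => intro q; simpa using ih (q.set i.toNat (f i.toNat))

theorem pv_getElem_foldl_set (f : Nat → String) :
    ∀ (idxs : List Int) (q : List String), (∀ i ∈ idxs, 0 ≤ i) → ∀ (j : Nat) (hj : j < q.length),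
      (idxs.foldl (fun q i => q.set i.toNat (f i.toNat)) q)[j]'(by rw [pv_length_foldl_set]; exact hj) =
        if (j : Int) ∈ idxs then f j else q[j]'hj := by
  intro idxs
  induction idxs with
  | nil => intro q _ j hj; simp
  | cons i rest ih =>
    intro q hnn j hj
    have h0 : 0 ≤ i := hnn i (by simp)
    have := ih (q.set i.toNat (f i.toNat)) (fun x hx => hnn x (by simp [hx])) j (by simpa using hj)
    simp only [List.foldl_cons]
    rw [this]
    by_cases hm : (j : Int) ∈ rest
    · simp [hm]
    · rw [if_neg hm, List.getElem_set]
      by_cases he : i.toNat = j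
      · have : (j : Int) = i := by omega
        simp [he, this]
      · have : (j : Int) ≠ i := by omega
        simp [he, List.mem_cons, this, hm]

-- ---- A's loop body, characterised on an 'involving' index ----

theorem pvPred_true_iff (v : String) : pvPred v = true ↔ (v ≠ "." ∧ v ≠ "y") := by
  simp [pvPred]

theorem AStep_eq (p : List String) (k : Nat) (hk : k < p.length)
    (hinv : p[k] = "involving") (hdot : "." ∈ p.drop (k + 1))
    (tp ts : List String) (hdk : tp.drop k = p.drop k) (hlen : tp.length = p.length) :
    changeinvolveStep (tp, ts) ((k : Nat) : Int) =
      (tp.set k (pvRval p k), ts.set k (pvRval p k)) := by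
  have hdropk : p.drop k = "involving" :: p.drop (k + 1) := by
    rw [List.drop_eq_getElem_cons hk, hinv]
  set t := p.drop (k + 1) with ht
  have htlen : t.length = p.length - (k + 1) := by simp [ht]
  have hslice : PySem.List.slice tp (some ((k : Nat) : Int)) none = "involving" :: t := by
    rw [PySem.List.slice_from_natCast, hdk, hdropk]
  obtain ⟨d, hd⟩ := Option.isSome_iff_exists.mp ((PySem.List.index?_isSome_iff t ".").mpr hdot)
  obtain ⟨hdlt, hdval, hdmin⟩ := PySem.List.getElem_of_index?_eq_some hd
  have hidxd : PySem.List.index? ("involving" :: t) "." = some (d + 1) := by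
    rw [PySem.List.index?_cons_of_ne t (by decide), hd]; rfl
  have key : ∀ seg : List String, seg = "involving" :: (t.takeWhile pvPred) →
      (if seg.count "l" > 0 ∧ seg.count "d" = 0 then
        (PySem.List.pySetD tp ((k : Nat) : Int) "in", PySem.List.pySetD ts ((k : Nat) : Int) "in")
      else if seg.count "d" > 0 then
        (PySem.List.pySetD tp ((k : Nat) : Int) ".", PySem.List.pySetD ts ((k : Nat) : Int) ".")
      else
        (PySem.List.pySetD tp ((k : Nat) : Int) "", PySem.List.pySetD ts ((k : Nat) : Int) "")) =
      (tp.set k (pvRval p k), ts.set k (pvRval p k)) := by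
    intro seg hseg
    have hcl : seg.count "l" = (t.takeWhile pvPred).count "l" := by
      rw [hseg, List.count_cons]; simp
    have hcd : seg.count "d" = (t.takeWhile pvPred).count "d" := by
      rw [hseg, List.count_cons]; simp
    have hrv : pvRval p k =
        (if (t.takeWhile pvPred).count "d" > 0 then "."
         else if (t.takeWhile pvPred).count "l" > 0 then "in" else "") := by
      simp only [pvRval, ← ht]
    rw [PySem.List.pySetD_natCast, PySem.List.pySetD_natCast, PySem.List.pySetD_natCast,
      PySem.List.pySetD_natCast, PySem.List.pySetD_natCast, PySem.List.pySetD_natCast,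
      hcl, hcd, hrv]
    by_cases hdp : (t.takeWhile pvPred).count "d" > 0
    · rw [if_neg (by omega), if_pos hdp]
      simp [hdp]
    · rw [if_neg hdp]
      by_cases hlp : (t.takeWhile pvPred).count "l" > 0
      · rw [if_pos ⟨hlp, by omega⟩]
        simp [hdp, hlp]
      · rw [if_neg (by omega), if_neg hlp]
        simp [hdp, hlp]
  simp only [changeinvolveStep, hslice, hidxd, Option.getD_some]
  have hdrop_tp : tp.drop k = "involving" :: t := by rw [hdk, hdropk]
  by_cases hy : "y" ∈ t
  · obtain ⟨e, he⟩ := Option.isSome_iff_exists.mp ((PySem.List.index?_isSome_iff t "y").mpr hy)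
    obtain ⟨helt, heval, hemin⟩ := PySem.List.getElem_of_index?_eq_some he
    have hidxy : PySem.List.index? ("involving" :: t) "y" = some (e + 1) := by
      rw [PySem.List.index?_cons_of_ne t (by decide), he]; rfl
    have hycnt : ("involving" :: t).count "y" > 0 := by
      simp only [List.count_cons]
      have := List.count_pos_iff.mpr hy
      omega
    rw [if_pos hycnt, hidxy]
    simp only [Option.getD_some]
    have htake : t.take (min d e) = t.takeWhile pvPred := by
      apply take_eq_takeWhile_of pvPred t (min d e) (by omega)
      · intro j hj
        rw [pvPred_true_iff]
        exact ⟨hdmin j (by omega), hemin j (by omega)⟩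
      · intro hlt
        rcases Nat.le_total d e with hde | hde
        · have hmin : min d e = d := Nat.min_eq_left hde
          have hv : t[min d e]'hlt = "." := by simp only [hmin]; exact hdval
          rw [hv]; decide
        · have hmin : min d e = e := Nat.min_eq_right hde
          have hv : t[min d e]'hlt = "y" := by simp only [hmin]; exact heval
          rw [hv]; decide
    by_cases hde2 : ((d + 1 : Nat) : Int) + (k : Nat) < ((e + 1 : Nat) : Int) + (k : Nat)
    · rw [if_pos hde2]
      have hb : ((d + 1 : Nat) : Int) + ((k : Nat) : Int) = ((d + 1 + k : Nat) : Int) := by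
        push_cast; ring
      rw [hb, PySem.List.slice_natCast, hdrop_tp]
      have h2 : d + 1 + k - k = d + 1 := by omega
      rw [h2]
      have hmin : min d e = d := by omega
      apply key
      rw [List.take_succ_cons, ← hmin, htake]
    · rw [if_neg hde2]
      have hb : ((e + 1 : Nat) : Int) + ((k : Nat) : Int) = ((e + 1 + k : Nat) : Int) := by
        push_cast; ring
      rw [hb, PySem.List.slice_natCast, hdrop_tp]
      have h2 : e + 1 + k - k = e + 1 := by omega
      rw [h2]
      have hmin : min d e = e := by omega
      apply key
      rw [List.take_succ_cons, ← hmin, htake]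
  · have hycnt : ¬ (("involving" :: t).count "y" > 0) := by
      simp only [List.count_cons]
      have : "y" ∉ ("involving" :: t) := by simp [hy]
      have h0 : ("involving" :: t).count "y" = 0 := List.count_eq_zero.mpr this
      simp only [List.count_cons] at h0
      omega
    rw [if_neg hycnt]
    have hlt : ((d + 1 : Nat) : Int) + (k : Nat) < (tp.length : Int) := by
      rw [hlen]; omega
    rw [if_pos hlt]
    have hb : ((d + 1 : Nat) : Int) + ((k : Nat) : Int) = ((d + 1 + k : Nat) : Int) := by
      push_cast; ring
    rw [hb, PySem.List.slice_natCast, hdrop_tp]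
    have h2 : d + 1 + k - k = d + 1 := by omega
    rw [h2]
    have htake : t.take d = t.takeWhile pvPred := by
      apply take_eq_takeWhile_of pvPred t d (by omega)
      · intro j hj
        rw [pvPred_true_iff]
        refine ⟨hdmin j hj, ?_⟩
        intro hcon
        exact hy (hcon ▸ List.getElem_mem _)
      · intro hlt'
        rw [hdval]; decide
    apply key
    rw [List.take_succ_cons, htake]

-- ---- A's whole loop ----

theorem Afold (p : List String) :
    ∀ (idxs : List Int) (tp ts : List String),
      tp.length = p.length →
      (∀ i ∈ idxs, ∃ k : Nat, i = (k : Int) ∧ ∃ hk : k < p.length,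
        p[k] = "involving" ∧ "." ∈ p.drop (k + 1) ∧ tp.drop k = p.drop k) →
      idxs.Pairwise (· < ·) →
      idxs.foldl changeinvolveStep (tp, ts) =
        (idxs.foldl (fun q i => q.set i.toNat (pvRval p i.toNat)) tp,
         idxs.foldl (fun q i => q.set i.toNat (pvRval p i.toNat)) ts) := by
  intro idxs
  induction idxs with
  | nil => intro tp ts _ _ _; rfl
  | cons i rest ih =>
    intro tp ts hlen hmem hpair
    obtain ⟨k, hik, hk, hinv, hdot, hdk⟩ := hmem i (by simp)
    have hstep : changeinvolveStep (tp, ts) i = (tp.set k (pvRval p k), ts.set k (pvRval p k)) := by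
      rw [hik]; exact AStep_eq p k hk hinv hdot tp ts hdk hlen
    have hitn : i.toNat = k := by rw [hik]; omega
    simp only [List.foldl_cons, hstep, hitn]
    rw [ih (tp.set k (pvRval p k)) (ts.set k (pvRval p k)) (by simpa using hlen)
      (fun j hj => by
        obtain ⟨m, hjm, hm, hinv', hdot', hdk'⟩ := hmem j (by simp [hj])
        have hij : i < j := (List.pairwise_cons.mp hpair).1 j hj
        have hkm : k < m := by omega
        exact ⟨m, hjm, hm, hinv', hdot', by
          rw [pv_drop_set_of_lt tp k m (pvRval p k) hkm, hdk']⟩)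
      (List.pairwise_cons.mp hpair).2]

-- ---- B's whole loop ----

theorem Bstate_zero (p s : List String) :
    ((pvRmap (p.drop 0)).2.1, (pvRmap (p.drop 0)).2.2, ((0 : Nat) : Int),
      p.take 0 ++ pvApply (p.drop 0) (pvRmap (p.drop 0)).1,
      pvApplyS s (pvRmap (p.drop 0)).1 0) =
    ((pvRmap p).2.1, (pvRmap p).2.2, (0 : Int), pvApply p (pvRmap p).1,
      pvApplyS s (pvRmap p).1 0) := by
  simp

theorem Bfold (p s : List String) :
    ∀ (k : Nat), k ≤ p.length →
      ((p.take k).reverse).foldl changeinvolveAltStep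
        ((pvRmap (p.drop k)).2.1, (pvRmap (p.drop k)).2.2, ((k : Nat) : Int),
          p.take k ++ pvApply (p.drop k) (pvRmap (p.drop k)).1,
          pvApplyS s (pvRmap (p.drop k)).1 k) =
      ((pvRmap p).2.1, (pvRmap p).2.2, (0 : Int), pvApply p (pvRmap p).1,
        pvApplyS s (pvRmap p).1 0) := by
  intro k
  induction k with
  | zero => intro _; simpa using Bstate_zero p s
  | succ k ih =>
    intro hk1
    have hk : k < p.length := by omega
    have htake : p.take (k + 1) = p.take k ++ [p[k]'hk] := by
      rw [List.take_succ, List.getElem?_eq_getElem hk]; rfl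
    have hdropk : p.drop k = p[k]'hk :: p.drop (k + 1) := List.drop_eq_getElem_cons hk
    have hstep : changeinvolveAltStep
        ((pvRmap (p.drop (k + 1))).2.1, (pvRmap (p.drop (k + 1))).2.2, ((k + 1 : Nat) : Int),
          (p.take k ++ [p[k]'hk]) ++ pvApply (p.drop (k + 1)) (pvRmap (p.drop (k + 1))).1,
          pvApplyS s (pvRmap (p.drop (k + 1))).1 (k + 1)) (p[k]'hk) =
        ((pvRmap (p.drop k)).2.1, (pvRmap (p.drop k)).2.2, ((k : Nat) : Int),
          p.take k ++ pvApply (p.drop k) (pvRmap (p.drop k)).1,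
          pvApplyS s (pvRmap (p.drop k)).1 k) := by
      set v := p[k]'hk with hv
      set rest := p.drop (k + 1) with hrest
      have hidec : ((k + 1 : Nat) : Int) - 1 = ((k : Nat) : Int) := by push_cast; ring
      simp only [changeinvolveAltStep, hidec]
      by_cases h1 : (v = "." ∨ v = "y")
      · rw [if_pos h1]
        have hrm : pvRmap (p.drop k) = (none :: (pvRmap rest).1, 0, 0) := by
          rw [hdropk]
          simp only [pvRmap]
          rw [if_pos h1]
        rw [hrm]
        simp only [hdropk, pvApply, List.zipWith_cons_cons, Option.getD_none]
        rw [List.append_assoc]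
        rfl
      · rw [if_neg h1]
        by_cases h2 : v = "l"
        · rw [if_pos h2]
          have hrm : pvRmap (p.drop k) =
              (none :: (pvRmap rest).1, (pvRmap rest).2.1 + 1, (pvRmap rest).2.2) := by
            rw [hdropk]
            simp only [pvRmap]
            rw [if_neg h1, if_pos h2]
          rw [hrm]
          simp only [hdropk, pvApply, List.zipWith_cons_cons, Option.getD_none]
          rw [List.append_assoc]
          rfl
        · rw [if_neg h2]
          by_cases h3 : v = "d"
          · rw [if_pos h3]
            have hrm : pvRmap (p.drop k) =
                (none :: (pvRmap rest).1, (pvRmap rest).2.1, (pvRmap rest).2.2 + 1) := by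
              rw [hdropk]
              simp only [pvRmap]
              rw [if_neg h1, if_neg h2, if_pos h3]
            rw [hrm]
            simp only [hdropk, pvApply, List.zipWith_cons_cons, Option.getD_none]
            rw [List.append_assoc]
            rfl
          · rw [if_neg h3]
            by_cases h4 : v = "involving"
            · rw [if_pos h4]
              have hrm : pvRmap (p.drop k) =
                  (some (if (pvRmap rest).2.2 ≠ 0 then "."
                    else if (pvRmap rest).2.1 ≠ 0 then "in" else "") :: (pvRmap rest).1,
                    (pvRmap rest).2.1, (pvRmap rest).2.2) := by
                rw [hdropk]
                simp only [pvRmap]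
                rw [if_neg h1, if_neg h2, if_neg h3, if_pos h4]
              rw [hrm]
              set r := (if (pvRmap rest).2.2 ≠ 0 then "."
                else if (pvRmap rest).2.1 ≠ 0 then "in" else "") with hr
              simp only [hdropk, pvApply, List.zipWith_cons_cons, Option.getD_some]
              rw [PySem.List.pySetD_natCast, PySem.List.pySetD_natCast]
              simp only [Prod.mk.injEq]
              refine ⟨trivial, trivial, trivial, ?_, ?_⟩
              · rw [List.append_assoc, List.set_append,
                  if_neg (by simp only [List.length_take]; omega)]
                have h0 : k - (p.take k).length = 0 := by simp only [List.length_take]; omega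
                rw [h0]
                simp
              · rw [show pvApplyS s (some r :: (pvRmap rest).1) k =
                    pvApplyS (s.set k r) (pvRmap rest).1 (k + 1) from rfl,
                  pvApplyS_set_comm (pvRmap rest).1 s (k + 1) k r (by omega)]
            · rw [if_neg h4]
              have hrm : pvRmap (p.drop k) =
                  (none :: (pvRmap rest).1, (pvRmap rest).2.1, (pvRmap rest).2.2) := by
                rw [hdropk]
                simp only [pvRmap]
                rw [if_neg h1, if_neg h2, if_neg h3, if_neg h4]
              rw [hrm]
              simp only [hdropk, pvApply, List.zipWith_cons_cons, Option.getD_none]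
              rw [List.append_assoc]
              rfl
    rw [htake, List.reverse_append]
    simp only [List.reverse_singleton, List.singleton_append, List.foldl_cons]
    rw [hstep]
    exact ih (by omega)

-- ---- B's port evaluates to the annotation semantics ----

theorem alt_eq_apply (p s : List String) :
    changeinvolve_alt p s = (pvApply p (pvRmap p).1, pvApplyS s (pvRmap p).1 0) := by
  have h := Bfold p s p.length (le_refl _)
  simp only [List.take_length, List.drop_length] at h
  have hnil : pvRmap ([] : List String) = ([], 0, 0) := rfl
  rw [hnil] at h
  simp only [pvApply, List.zipWith_nil_right, List.append_nil] at h
  have hs : pvApplyS s ([] : List (Option String)) p.length = s := rfl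
  rw [hs] at h
  simp only [changeinvolve_alt, h]
  rfl

-- ---- the index list of A ----

theorem mem_tempI (p : List String) (i : Int) :
    (i ∈ (PySem.List.enumerate p 0).filterMap
        (fun iv => if iv.2 = "involving" then some iv.1 else none)) ↔
      ∃ (k : Nat) (hk : k < p.length), i = (k : Int) ∧ p[k] = "involving" := by
  rw [List.mem_filterMap]
  constructor
  · rintro ⟨⟨j, v⟩, hmem, hf⟩
    rw [PySem.List.mem_enumerate_iff] at hmem
    obtain ⟨k, hk, heq⟩ := hmem
    rw [Prod.mk.injEq] at heq
    obtain ⟨hj, hv⟩ := heq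
    by_cases hinv : v = "involving"
    · rw [if_pos hinv] at hf
      refine ⟨k, hk, ?_, by rw [← hv, hinv]⟩
      simp only [← Option.some_inj.mp hf, hj]; omega
    · rw [if_neg hinv] at hf; cases hf
  · rintro ⟨k, hk, rfl, hinv⟩
    refine ⟨(0 + (k : Int), p[k]), ?_, ?_⟩
    · rw [PySem.List.mem_enumerate_iff]; exact ⟨k, hk, rfl⟩
    · simp [hinv]
    
theorem pairwise_tempI (p : List String) :
    ((PySem.List.enumerate p 0).filterMap
        (fun iv => if iv.2 = "involving" then some iv.1 else none)).Pairwise (· < ·) := by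
  apply List.Pairwise.filterMap _ _ (PySem.List.pairwise_lt_enumerate p 0)
  rintro a b hab x hx y hy
  have hxa : x = a.1 := by
    by_cases h : a.2 = "involving"
    · rw [if_pos h] at hx; exact (Option.some_inj.mp hx).symm
    · rw [if_neg h] at hx; cases hx
  have hyb : y = b.1 := by
    by_cases h : b.2 = "involving"
    · rw [if_pos h] at hy; exact (Option.some_inj.mp hy).symm
    · rw [if_neg h] at hy; cases hy
  rw [hxa, hyb]; exact hab

-- ---- pointwise reconciliation of the two result descriptions ----

theorem finalP (p : List String) (I : List Int)
    (hiff : ∀ (j : Nat) (hj : j < p.length), ((j : Int) ∈ I ↔ p[j] = "involving"))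
    (hnn : ∀ i ∈ I, 0 ≤ i) :
    I.foldl (fun q i => q.set i.toNat (pvRval p i.toNat)) p = pvApply p (pvRmap p).1 := by
  apply List.ext_getElem
  · rw [pv_length_foldl_set, pvApply_length p _ (pvRmap_anns_length p)]
  · intro j h1 h2
    have hj : j < p.length := by rwa [pv_length_foldl_set] at h1
    rw [pv_getElem_foldl_set (fun m => pvRval p m) I p hnn j hj,
      pvApply_getElem p _ (pvRmap_anns_length p) j hj, pvRmap_anns_getElem p j hj]
    by_cases hinv : p[j] = "involving"
    · rw [if_pos ((hiff j hj).mpr hinv), if_pos hinv]; rfl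
    · rw [if_neg (fun hmem => hinv ((hiff j hj).mp hmem)), if_neg hinv]; rfl

theorem finalS (p s : List String) (I : List Int)
    (hiff : ∀ (j : Nat) (hj : j < p.length), ((j : Int) ∈ I ↔ p[j] = "involving"))
    (hnn : ∀ i ∈ I, 0 ≤ i) (hlt : ∀ i ∈ I, i < (p.length : Int)) :
    I.foldl (fun q i => q.set i.toNat (pvRval p i.toNat)) s = pvApplyS s (pvRmap p).1 0 := by
  apply List.ext_getElem
  · rw [pv_length_foldl_set, pvApplyS_length]
  · intro j h1 h2
    have hj : j < s.length := by rwa [pv_length_foldl_set] at h1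
    rw [pv_getElem_foldl_set (fun m => pvRval p m) I s hnn j hj,
      pvApplyS_getElem (pvRmap p).1 s 0 j hj]
    by_cases hjp : j < p.length
    · rw [dif_pos ⟨Nat.zero_le _, by rw [pvRmap_anns_length]; simpa using hjp⟩]
      have hg : (pvRmap p).1[j - 0]'(by rw [pvRmap_anns_length]; simpa using hjp) =
          if p[j]'hjp = "involving" then some (pvRval p j) else none := by
        have := pvRmap_anns_getElem p j hjp
        simpa using this
      rw [hg]
      by_cases hinv : p[j]'hjp = "involving"
      · rw [if_pos ((hiff j hjp).mpr hinv), if_pos hinv]; rfl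
      · rw [if_neg (fun hmem => hinv ((hiff j hjp).mp hmem)), if_neg hinv]; rfl
    · rw [dif_neg (by rw [pvRmap_anns_length]; rintro ⟨_, hb⟩; omega)]
      rw [if_neg (fun hmem => by have := hlt _ hmem; omega)]

-- ===== VERDICT (by name: the statement is the Claim_ definition above) =====
theorem changeinvolve_spec : Claim_equal_changeinvolve := by
  intro p s _ hpre
  unfold Spec_changeinvolve
  rw [alt_eq_apply]
  set I := (PySem.List.enumerate p 0).filterMap
      (fun iv => if iv.2 = "involving" then some iv.1 else none) with hI
  have hmemI : ∀ i, i ∈ I ↔ ∃ (k : Nat) (hk : k < p.length), i = (k : Int) ∧ p[k] = "involving" := by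
    intro i; rw [hI]; exact mem_tempI p i
  have hiff : ∀ (j : Nat) (hj : j < p.length), ((j : Int) ∈ I ↔ p[j] = "involving") := by
    intro j hj
    rw [hmemI]
    constructor
    · rintro ⟨k, hk, hkj, hkv⟩
      have : k = j := by omega
      subst this; exact hkv
    · intro hv; exact ⟨j, hj, rfl, hv⟩
  have hnn : ∀ i ∈ I, 0 ≤ i := by
    intro i hi; obtain ⟨k, hk, rfl, _⟩ := (hmemI i).mp hi; omega
  have hlt : ∀ i ∈ I, i < (p.length : Int) := by
    intro i hi; obtain ⟨k, hk, rfl, _⟩ := (hmemI i).mp hi; omega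
  by_cases hc : p.count "involving" > 0
  · simp only [changeinvolve, ← hI]
    rw [if_pos hc]
    rw [Afold p I p s rfl ?_ (pairwise_tempI p)]
    · rw [finalP p I hiff hnn, finalS p s I hiff hnn hlt]
    · intro i hi
      obtain ⟨k, hk, rfl, hkv⟩ := (hmemI i).mp hi
      obtain ⟨hdot, hks⟩ := hpre k hk hkv
      refine ⟨k, rfl, hk, hkv, ?_, rfl⟩
      rw [List.drop_eq_getElem_cons hk, hkv] at hdot
      rcases List.mem_cons.mp hdot with h | h
      · exact absurd h (by decide)
      · exact h
  · simp only [changeinvolve, ← hI]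
    rw [if_neg hc]
    have hni : ∀ (j : Nat) (hj : j < p.length), p[j] ≠ "involving" := by
      intro j hj hcon
      have h0 : p.count "involving" = 0 := by omega
      exact absurd (hcon ▸ List.getElem_mem hj) (List.count_eq_zero.mp h0)
    have hiff0 : ∀ (j : Nat) (hj : j < p.length), ((j : Int) ∈ ([] : List Int) ↔ p[j] = "involving") := by
      intro j hj
      constructor
      · intro h; cases h
      · intro hv; exact absurd hv (hni j hj)
    have h1 := finalP p [] hiff0 (by intro i hi; cases hi)
    have h2 := finalS p s [] hiff0 (by intro i hi; cases hi) (by intro i hi; cases hi)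
    simp only [List.foldl_nil] at h1 h2
    rw [Prod.mk.injEq]
    exact ⟨h1, h2⟩
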